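-- pv_equiv track=rewrite | github.com/Rogerio-auto/System-BP | scripts/slot.py | _files_overlap
-- ===== SOURCE A (Python) =====
-- def _files_overlap(a: list[str], b: list[str]) -> bool:
--     """True se quaisquer dois globs/paths se sobrepõem ao nível de pasta."""
--     def norm(g: str) -> str:
--         # Compara só o prefixo até o primeiro '*' ou fim
--         return g.split("*")[0].rstrip("/")
--     pa = [norm(x) for x in a]
--     pb = [norm(x) for x in b]
--     for x in pa:
--         for y in pb:
--             if x.startswith(y) or y.startswith(x):
--                 # path identico OU um é prefixo do outro
--                 return True
--     return False
-- ===== SOURCE B (Python) =====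
-- def _files_overlap(a: list[str], b: list[str]) -> bool:
--     """True se quaisquer dois globs/paths se sobrepõem ao nível de pasta."""
--     def norm(g: str) -> str:
--         return g.split("*")[0].rstrip("/")
--     pa = {norm(x) for x in a}
--     pb = {norm(x) for x in b}
--     def hits(s, pool):
--         # some member of the pool is a prefix of s
--         return any(s[:i] in pool for i in range(len(s) + 1))
--     return any(hits(y, pa) for y in pb) or any(hits(x, pb) for x in pa)
-- ===== Notes on version B (the rewrite author's own statement) =====
-- stated objective: alternative
-- what changed: Replaces the all-pairs startswith scan by hash sets of normalized prefixes: for each string, membership of each of its prefixes in the other side's set is tested, removing the inner scan over the other list (trades the n*m pairwise scan for per-string prefix enumeration).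
import Mathlib
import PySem

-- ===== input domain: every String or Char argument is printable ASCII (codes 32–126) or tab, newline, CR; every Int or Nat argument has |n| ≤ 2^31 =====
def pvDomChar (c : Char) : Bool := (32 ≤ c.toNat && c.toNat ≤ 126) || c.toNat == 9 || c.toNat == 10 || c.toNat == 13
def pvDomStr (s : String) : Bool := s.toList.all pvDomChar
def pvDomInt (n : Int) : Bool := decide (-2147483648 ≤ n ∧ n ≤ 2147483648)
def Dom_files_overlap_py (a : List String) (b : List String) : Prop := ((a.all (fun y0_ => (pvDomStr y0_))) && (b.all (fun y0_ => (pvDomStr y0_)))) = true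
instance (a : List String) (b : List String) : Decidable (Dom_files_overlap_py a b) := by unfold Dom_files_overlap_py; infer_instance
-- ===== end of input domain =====

-- B replaces A's all-pairs startswith scan by hash sets of normalized prefixes with a per-string prefix-membership test, removing the inner scan over the other list (alternative algorithm; no n*m pairwise term).

-- ===== PORT A =====
def fo_norm (g : String) : String :=
  -- g.split("*")[0]: split? with the non-empty separator "*" always returns some, and the
  -- list is non-empty, so [0] is headD. .rstrip("/") is ported by hand, exact: the chars
  -- argument is the single character '/', so it drops trailing '/' characters.
  let parts := (PySem.Str.split? g "*").getD []
  let first := parts.headD ""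
  String.ofList ((first.toList.reverse.dropWhile (fun c => c == '/')).reverse)

def files_overlap_py (a : List String) (b : List String) : Bool :=
  let pa := a.map fo_norm
  let pb := b.map fo_norm
  pa.any (fun x => pb.any (fun y =>
    PySem.Str.startswith x y || PySem.Str.startswith y x))

-- ===== PORT B =====
-- B: hash-set of each side's normalized prefixes; a string overlaps the other side iff
-- one of its own prefixes s[:i] is in the other side's set.
def fo_hits (s : String) (pool : PySem.Set String) : Bool :=
  (PySem.List.pyRange 0 ((s.length : Int) + 1) 1).any
    (fun i => PySem.Set.contains pool (PySem.Str.slice s none (some i)))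

def files_overlap_py_alt (a : List String) (b : List String) : Bool :=
  let pa := PySem.Set.ofList (a.map fo_norm)
  let pb := PySem.Set.ofList (b.map fo_norm)
  pb.any (fun y => fo_hits y pa) || pa.any (fun x => fo_hits x pb)

-- ===== PRECONDITION & SPEC =====
def Spec_files_overlap_py (a : List String) (b : List String) (out : Bool) : Prop := out = files_overlap_py_alt a b
instance (a : List String) (b : List String) (out : Bool) : Decidable (Spec_files_overlap_py a b out) := by unfold Spec_files_overlap_py; infer_instance

-- ===== CLAIM (what is proved, stated in full; the proofs are below) =====
def Claim_equal_files_overlap_py : Prop := ∀ (a : List String) (b : List String), Dom_files_overlap_py a b → Spec_files_overlap_py a b (files_overlap_py a b)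

-- ===== LEMMAS AND PROOFS =====

theorem fo_hits_iff (s : String) (pool : PySem.Set String) :
    fo_hits s pool = true ↔ ∃ t ∈ pool, t.toList <+: s.toList := by
  unfold fo_hits
  simp only [List.any_eq_true, PySem.List.mem_pyRange_one]
  constructor
  · rintro ⟨i, ⟨h0, _⟩, hc⟩
    refine ⟨PySem.Str.slice s none (some i), by simpa [PySem.Set.contains] using hc, ?_⟩
    rw [PySem.Str.toList_slice, PySem.Chars.slice_eq_listSlice, PySem.List.slice_to _ h0]
    exact List.take_prefix _ _
  · rintro ⟨t, ht, hpre⟩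
    have hlen : t.toList.length ≤ s.toList.length := hpre.length_le
    have hst : PySem.Str.slice s none (some (t.length : Int)) = t := by
      rw [← String.toList_inj, PySem.Str.toList_slice, PySem.Chars.slice_eq_listSlice,
        PySem.List.slice_to _ (by positivity)]
      simpa using (List.prefix_iff_eq_take.mp hpre).symm
    refine ⟨(t.length : Int), ⟨by positivity, ?_⟩, ?_⟩
    · have hs : s.toList.length = s.length := by simp
      have htl : t.toList.length = t.length := by simp
      omega
    · simp [PySem.Set.contains, hst, ht]

theorem fo_startswith_iff (x y : String) :
    PySem.Str.startswith x y = true ↔ y.toList <+: x.toList := by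
  rw [PySem.Str.startswith_eq]; exact PySem.Chars.startswith_iff _ _


-- ===== VERDICT (by name: the statement is the Claim_ definition above) =====
theorem files_overlap_py_spec : Claim_equal_files_overlap_py := by
  intro a b _
  unfold Spec_files_overlap_py files_overlap_py files_overlap_py_alt
  rw [Bool.eq_iff_iff]
  simp only [List.any_eq_true, Bool.or_eq_true, fo_hits_iff, fo_startswith_iff,
    PySem.Set.mem_ofList]
  constructor
  · rintro ⟨x, hx, y, hy, h | h⟩
    · exact Or.inr ⟨x, hx, y, hy, h⟩
    · exact Or.inl ⟨y, hy, x, hx, h⟩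
  · rintro (⟨y, hy, x, hx, h⟩ | ⟨x, hx, y, hy, h⟩)
    · exact ⟨x, hx, y, hy, Or.inr h⟩
    · exact ⟨x, hx, y, hy, Or.inl h⟩
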